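-- pv_equiv track=rewrite | github.com/end0tknr/SpringVue | src/main/python/lib/service/kokusei2015_population.py | divide_rows
-- ===== SOURCE A (Python) =====
-- def divide_rows(org_rows, chunk_size, atri_keys):
--     i = 0
--     chunk = []
--     ret_rows = []
--     for org_row in org_rows:
--         new_tuple = ()
--         for atri_key in atri_keys:
--             new_tuple += (org_row[atri_key],)
--         chunk.append( new_tuple )
--
--         if len(chunk) >= chunk_size:
--             ret_rows.append(chunk)
--             chunk = []
--         i += 1
--
--     if len(chunk) > 0:
--         ret_rows.append(chunk)
--
--     return ret_rows
-- ===== SOURCE B (Python) =====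
-- def divide_rows(org_rows, chunk_size, atri_keys):
--     items = [tuple(row[k] for k in atri_keys) for row in org_rows]
--     step = chunk_size if chunk_size > 1 else 1
--     ret_rows = []
--     while items:
--         ret_rows.append(items[:step])
--         items = items[step:]
--     return ret_rows
-- ===== Notes on version B (the rewrite author's own statement) =====
-- stated objective: simpler
-- what changed: Replaces A's single fold carrying running chunk/flush state (with a final leftover flush) by a two-stage decomposition: project every row first, then repeatedly slice off step-sized chunks (step = max(chunk_size,1), reproducing A's singleton chunks for chunk_size <= 1).
import Mathlib
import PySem

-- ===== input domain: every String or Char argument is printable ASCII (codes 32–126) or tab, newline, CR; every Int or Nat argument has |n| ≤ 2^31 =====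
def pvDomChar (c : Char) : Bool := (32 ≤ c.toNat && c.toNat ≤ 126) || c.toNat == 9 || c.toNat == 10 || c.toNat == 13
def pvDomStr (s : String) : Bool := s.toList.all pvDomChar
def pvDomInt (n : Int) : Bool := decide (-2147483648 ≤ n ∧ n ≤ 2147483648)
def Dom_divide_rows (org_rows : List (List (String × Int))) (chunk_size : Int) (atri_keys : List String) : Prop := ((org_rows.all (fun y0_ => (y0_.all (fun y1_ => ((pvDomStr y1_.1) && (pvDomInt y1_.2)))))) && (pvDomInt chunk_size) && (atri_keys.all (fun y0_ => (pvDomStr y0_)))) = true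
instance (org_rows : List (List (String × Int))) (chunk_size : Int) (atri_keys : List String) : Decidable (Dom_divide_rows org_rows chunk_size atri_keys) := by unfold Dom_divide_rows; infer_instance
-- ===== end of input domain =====

-- B replaces A's fold with running chunk/flush state by a projection map followed by slicing
-- off `step`-sized chunks; objective: simpler. (A's unused counter `i` is omitted as dead code.)

-- ===== PORT A =====
-- A's loop: state = (current chunk, finished chunks); org_row[atri_key] is a dict lookup,
-- total here via getD 0 — Pre_ excludes the KeyError inputs where the default would be read.
def divide_rows (org_rows : List (List (String × Int))) (chunk_size : Int) (atri_keys : List String) : List (List (List Int)) :=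
  let st := org_rows.foldl
    (fun (st : List (List Int) × List (List (List Int))) org_row =>
      let new_tuple := atri_keys.foldl (fun acc k => acc ++ [(PySem.Dict.mk org_row).getD k 0]) []
      let chunk := st.1 ++ [new_tuple]
      if chunk_size ≤ (chunk.length : Int) then ([], st.2 ++ [chunk]) else (chunk, st.2))
    ([], [])
  if 0 < st.1.length then st.2 ++ [st.1] else st.2

-- ===== PORT B =====
-- Source B's while loop: `items[:step]` / `items[step:]` with step ≥ 1; exact as take/drop since
-- the slice index is a positive int (on a nonempty list, drop n (x::t) = drop (n-1) t).
def pvChunks (n : Nat) : List (List Int) → List (List (List Int))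
  | [] => []
  | x :: t => (x :: t).take n :: pvChunks n (t.drop (n - 1))
termination_by l => l.length
decreasing_by
  simp only [List.length_drop, List.length_cons]; omega

def divide_rows_alt (org_rows : List (List (String × Int))) (chunk_size : Int) (atri_keys : List String) : List (List (List Int)) :=
  let items := org_rows.map (fun row => atri_keys.map (fun k => (PySem.Dict.mk row).getD k 0))
  let step : Nat := if 1 < chunk_size then chunk_size.toNat else 1
  pvChunks step items

-- ===== PRECONDITION & SPEC =====
-- Pre_ excludes exactly the inputs where Python A raises KeyError: some requested key missing from some row.
def Pre_divide_rows (org_rows : List (List (String × Int))) (chunk_size : Int) (atri_keys : List String) : Prop :=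
  ∀ row ∈ org_rows, ∀ k ∈ atri_keys, (PySem.Dict.mk row).contains k = true
instance (org_rows : List (List (String × Int))) (chunk_size : Int) (atri_keys : List String) : Decidable (Pre_divide_rows org_rows chunk_size atri_keys) := by unfold Pre_divide_rows; infer_instance

def pvWitness_divide_rows : (List (List (String × Int))) × Int × List String :=
  ([[("a", 1), ("b", 2)], [("a", 3), ("b", 4)], [("a", 5), ("b", 6)]], 2, ["a", "b"])

def Spec_divide_rows (org_rows : List (List (String × Int))) (chunk_size : Int) (atri_keys : List String) (out : List (List (List Int))) : Prop := out = divide_rows_alt org_rows chunk_size atri_keys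
instance (org_rows : List (List (String × Int))) (chunk_size : Int) (atri_keys : List String) (out : List (List (List Int))) : Decidable (Spec_divide_rows org_rows chunk_size atri_keys out) := by unfold Spec_divide_rows; infer_instance

-- ===== CLAIM (what is proved, stated in full; the proofs are below) =====
def Claim_equal_divide_rows : Prop := ∀ (org_rows : List (List (String × Int))) (chunk_size : Int) (atri_keys : List String), Dom_divide_rows org_rows chunk_size atri_keys → Pre_divide_rows org_rows chunk_size atri_keys → Spec_divide_rows org_rows chunk_size atri_keys (divide_rows org_rows chunk_size atri_keys)

-- ===== LEMMAS AND PROOFS =====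

-- a full chunk peels off the front
theorem pvChunks_exact (n : Nat) (c rest : List (List Int)) (hc : c.length = n) (hpos : 0 < n) :
    pvChunks n (c ++ rest) = c :: pvChunks n rest := by
  cases c with
  | nil => simp at hc; omega
  | cons y ys =>
    rw [List.cons_append, pvChunks]
    have hys : ys.length = n - 1 := by simp at hc; omega
    have h1 : (y :: (ys ++ rest)).take n = y :: ys := by
      rw [show n = (y :: ys).length from hc.symm]
      simp
    have h2 : (ys ++ rest).drop (n - 1) = rest := by
      rw [← hys, List.drop_left]
    rw [h1, h2]

-- A's fold over rows, from any in-progress state, produces the slice chunks of the projections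
theorem pvLoopEq (cs : Int) (n : Nat) (hn : n = if 1 < cs then cs.toNat else 1)
    {α : Type} (f : α → List Int) :
    ∀ (rows : List α) (chunk : List (List Int)) (ret : List (List (List Int))), chunk.length < n →
    (let st := rows.foldl
        (fun (st : List (List Int) × List (List (List Int))) r =>
          let c := st.1 ++ [f r]
          if cs ≤ (c.length : Int) then ([], st.2 ++ [c]) else (c, st.2))
        (chunk, ret)
     if 0 < st.1.length then st.2 ++ [st.1] else st.2)
    = ret ++ pvChunks n (chunk ++ rows.map f) := by
  have hpos : 0 < n := by rw [hn]; split <;> omega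
  intro rows
  induction rows with
  | nil =>
    intro chunk ret h
    cases chunk with
    | nil => simp [pvChunks]
    | cons x t =>
      simp only [List.map_nil, List.append_nil, List.foldl_nil]
      rw [pvChunks]
      have ht : t.drop (n - 1) = [] := by
        apply List.drop_eq_nil_of_le; simp at h; omega
      have htk : (x :: t).take n = x :: t := List.take_of_length_le (le_of_lt h)
      simp [ht, htk, pvChunks]
  | cons r rest ih =>
    intro chunk ret h
    have hcond : (cs ≤ ((chunk ++ [f r]).length : Int)) ↔ (n ≤ (chunk ++ [f r]).length) := by
      simp only [List.length_append, List.length_cons, List.length_nil]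
      rw [hn]; split <;> omega
    simp only [List.foldl_cons]
    by_cases hge : cs ≤ ((chunk ++ [f r]).length : Int)
    · have hlen : (chunk ++ [f r]).length = n := by
        have := hcond.mp hge
        simp only [List.length_append, List.length_cons, List.length_nil] at this ⊢
        omega
      rw [if_pos hge]
      have hih := ih [] (ret ++ [chunk ++ [f r]]) (by simpa using hpos)
      simp only [List.nil_append] at hih
      rw [hih, List.map_cons,
          show chunk ++ f r :: rest.map f = (chunk ++ [f r]) ++ rest.map f from by simp,
          pvChunks_exact n (chunk ++ [f r]) (rest.map f) hlen hpos]
      simp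
    · rw [if_neg hge]
      have hlt : (chunk ++ [f r]).length < n := by
        have := (not_iff_not.mpr hcond).mp hge
        omega
      rw [ih (chunk ++ [f r]) ret hlt, List.map_cons,
          show chunk ++ f r :: rest.map f = (chunk ++ [f r]) ++ rest.map f from by simp]

-- ===== VERDICT (by name: the statement is the Claim_ definition above) =====
theorem divide_rows_spec : Claim_equal_divide_rows := by
  intro org_rows chunk_size atri_keys _ _
  unfold Spec_divide_rows divide_rows divide_rows_alt
  simp only [PySem.List.foldl_append_singleton_eq_map, List.nil_append]
  have := pvLoopEq chunk_size (if 1 < chunk_size then chunk_size.toNat else 1) rfl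
    (fun row => atri_keys.map (fun k => (PySem.Dict.mk row).getD k 0))
    org_rows [] []
    (by simp only [List.length_nil]; split <;> omega)
  simpa only [List.nil_append] using this
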